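-- pv_equiv track=rewrite | github.com/akihikoy/ay_test | python/geometry/polygon/plan_spread_spline1.py | IdSampler
-- ===== SOURCE A (Python) =====
-- def IdSampler(N):
--   if N==0:  return []
--   if N==1:  return [0]
--   if N==2:  return [0,1]
--   src= list(range(N))
--   res= []
--   res.append(src.pop(0))
--   res.append(src.pop(-1))
--   d= 2
--   while True:
--     for i in range(1,d,2):
--       res.append(src.pop(len(src)*i//d))
--       if len(src)==0:  return res
--     d*= 2
-- ===== SOURCE B (Python) =====
-- def IdSampler(N):
--   if N==0:  return []
--   if N==1:  return [0]
--   if N==2:  return [0,1]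
--   M= N-2
--   # order-statistics segment tree over positions 0..M-1 (value = position+1);
--   # node = [size, alive_count, left, right]; select-and-delete the k-th alive
--   # position in O(log M) by descending from the root.
--   def build(m):
--     if m<=1:  return [1,1,None,None]
--     h= m//2
--     return [m,m,build(h),build(m-h)]
--   def select_remove(t,k):
--     off= 0
--     while True:
--       t[1]-= 1
--       if t[0]==1:  return off
--       if k<t[2][1]:  t= t[2]
--       else:
--         off+= t[2][0]; k-= t[2][1]; t= t[3]
--   t= build(M)
--   res= [0,N-1]
--   rem= M
--   d= 2
--   while True:
--     for i in range(1,d,2):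
--       p= select_remove(t, rem*i//d)
--       rem-= 1
--       res.append(p+1)
--       if rem==0:  return res
--     d*= 2
-- ===== Notes on version B (the rewrite author's own statement) =====
-- stated objective: faster
-- what changed: A repeatedly pops the k-th element out of a shrinking Python list (each pop shifts O(N) elements); B selects and deletes the k-th remaining element with an order-statistics segment tree in O(log N) per step.
import Mathlib
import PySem

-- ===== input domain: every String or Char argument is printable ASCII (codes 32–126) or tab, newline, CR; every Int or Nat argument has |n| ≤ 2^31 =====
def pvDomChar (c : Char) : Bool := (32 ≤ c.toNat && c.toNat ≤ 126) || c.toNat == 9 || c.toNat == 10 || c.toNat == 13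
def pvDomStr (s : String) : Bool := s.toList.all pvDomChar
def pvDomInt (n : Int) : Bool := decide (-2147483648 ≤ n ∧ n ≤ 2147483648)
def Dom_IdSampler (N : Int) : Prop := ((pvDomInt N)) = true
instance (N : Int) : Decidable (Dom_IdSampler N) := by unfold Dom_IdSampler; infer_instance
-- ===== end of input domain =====

-- B replaces A's quadratic pop-from-a-shrinking-list with an order-statistics
-- segment tree (select-and-delete k-th remaining in O(log N)); objective: faster.

-- ===== PORT A =====
-- literal port of A's inner `for i in range(1,d,2)` body; `.inr res` = `return res`
def IdSamplerForA : List Int → List Int → List Int → Int → (List Int × List Int) ⊕ List Int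
  | src, res, [], _ => Sum.inl (src, res)
  | src, res, i :: is, d =>
    match PySem.List.pop? src (PySem.Int.floordiv ((src.length : Int) * i) d) with
    | none => Sum.inr res  -- Python raises IndexError here (unreachable for N ≥ 3)
    | some (v, src') =>
      let res' := res ++ [v]
      if src'.length = 0 then Sum.inr res' else IdSamplerForA src' res' is d

-- A's `while True` loop; fuel bounds the number of outer iterations (ample: N.toNat)
def IdSamplerLoopA : Nat → List Int → List Int → Int → List Int
  | 0, _, res, _ => res
  | fuel + 1, src, res, d =>
    match IdSamplerForA src res (PySem.List.pyRange 1 d 2) d with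
    | Sum.inr res' => res'
    | Sum.inl (src', res') => IdSamplerLoopA fuel src' res' (d * 2)

def IdSampler (N : Int) : List Int :=
  if N = 0 then [] else
  if N = 1 then [0] else
  if N = 2 then [0, 1] else
  match PySem.List.pop? (PySem.List.pyRange 0 N 1) 0 with
  | none => []          -- Python raises IndexError (N < 0); outside Pre_
  | some (v0, s1) =>
    match PySem.List.pop? s1 (-1) with
    | none => [v0]      -- unreachable
    | some (v1, s2) => IdSamplerLoopA N.toNat s2 [v0, v1] 2

-- ===== PORT B =====
-- segment-tree node of Source B: [size, alive_count, left, right]; a leaf stores its count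
inductive BTree where
  | leaf (cnt : Nat)
  | node (sz cnt : Nat) (l r : BTree)
deriving DecidableEq, Repr

def bsz : BTree → Nat
  | .leaf _ => 1
  | .node sz _ _ _ => sz

def bcnt : BTree → Nat
  | .leaf c => c
  | .node _ c _ _ => c

-- Source B's build(m)
def bbuild (m : Nat) : BTree :=
  if _h : m ≤ 1 then .leaf 1
  else
    let hf := m / 2
    .node m m (bbuild hf) (bbuild (m - hf))
decreasing_by all_goals omega

-- Source B's select_remove: descend accumulating `off`; the Python mutates counts in
-- place, the pure port returns the decremented tree alongside the offset
def bselRem : BTree → Nat → Nat → Nat × BTree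
  | .leaf _, off, _ => (off, .leaf 0)
  | .node sz cnt l r, off, k =>
    if k < bcnt l then
      let (p, l') := bselRem l off k
      (p, .node sz (cnt - 1) l' r)
    else
      let (p, r') := bselRem r (off + bsz l) (k - bcnt l)
      (p, .node sz (cnt - 1) l r')

def IdSamplerForB : BTree → Int → List Int → List Int → Int → (BTree × Int × List Int) ⊕ List Int
  | t, rem, res, [], _ => Sum.inl (t, rem, res)
  | t, rem, res, i :: is, d =>
    let k := PySem.Int.floordiv (rem * i) d
    if 0 ≤ k ∧ k.toNat < bcnt t then   -- totalization guard: Python's select faults outside it (unreachable for N ≥ 3)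
      let (p, t') := bselRem t 0 k.toNat
      let rem' := rem - 1
      let res' := res ++ [(p : Int) + 1]
      if rem' = 0 then Sum.inr res' else IdSamplerForB t' rem' res' is d
    else Sum.inr res

def IdSamplerLoopB : Nat → BTree → Int → List Int → Int → List Int
  | 0, _, _, res, _ => res
  | fuel + 1, t, rem, res, d =>
    match IdSamplerForB t rem res (PySem.List.pyRange 1 d 2) d with
    | Sum.inr res' => res'
    | Sum.inl (t', rem', res') => IdSamplerLoopB fuel t' rem' res' (d * 2)

def IdSampler_alt (N : Int) : List Int :=
  if N = 0 then [] else
  if N = 1 then [0] else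
  if N = 2 then [0, 1] else
  let M := (N - 2).toNat
  IdSamplerLoopB N.toNat (bbuild M) (M : Int) [0, N - 1] 2

-- ===== PRECONDITION & SPEC =====
-- Pre_ excludes exactly the negative N, where A raises IndexError: range(N) is empty
-- there and A pops from that empty list.
def Pre_IdSampler (N : Int) : Prop := 0 ≤ N
instance (N : Int) : Decidable (Pre_IdSampler N) := by unfold Pre_IdSampler; infer_instance
def pvWitness_IdSampler : Int := 7
def Spec_IdSampler (N : Int) (out : List Int) : Prop := out = IdSampler_alt N
instance (N : Int) (out : List Int) : Decidable (Spec_IdSampler N out) := by unfold Spec_IdSampler; infer_instance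

-- ===== CLAIM (what is proved, stated in full; the proofs are below) =====
def Claim_equal_IdSampler : Prop := ∀ (N : Int), Dom_IdSampler N → Pre_IdSampler N → Spec_IdSampler N (IdSampler N)

-- ===== LEMMAS AND PROOFS =====

-- well-formedness: stored sizes/counts are the true leaf/alive-leaf counts
def BWF : BTree → Prop
  | .leaf c => c ≤ 1
  | .node sz cnt l r => BWF l ∧ BWF r ∧ sz = bsz l + bsz r ∧ cnt = bcnt l + bcnt r

-- positions (0-based, left to right) of the alive leaves
def balive : BTree → List Nat
  | .leaf c => if c = 0 then [] else [0]
  | .node _ _ l r => balive l ++ (balive r).map (· + bsz l)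

lemma balive_length (t : BTree) (h : BWF t) : (balive t).length = bcnt t := by
  induction t with
  | leaf c =>
    simp only [BWF] at h
    interval_cases c <;> simp [balive, bcnt]
  | node sz cnt l r ihl ihr =>
    obtain ⟨hl, hr, _, hc⟩ := h
    simp [balive, bcnt, hc, ihl hl, ihr hr]

lemma bselRem_spec (t : BTree) (off k : Nat) (h : BWF t) (hk : k < bcnt t) :
    (bselRem t off k).1 = off + (balive t).getD k 0
    ∧ balive (bselRem t off k).2 = (balive t).eraseIdx k
    ∧ BWF (bselRem t off k).2
    ∧ bsz (bselRem t off k).2 = bsz t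
    ∧ bcnt (bselRem t off k).2 = bcnt t - 1 := by
  induction t generalizing off k with
  | leaf c =>
    simp only [BWF] at h
    simp only [bcnt] at hk
    have hc : c = 1 := by omega
    have hk0 : k = 0 := by omega
    subst hc hk0
    simp [bselRem, balive, bcnt, bsz, BWF]
  | node sz cnt l r ihl ihr =>
    obtain ⟨hl, hr, hs, hc⟩ := h
    simp only [bcnt] at hk
    by_cases hkl : k < bcnt l
    · obtain ⟨ih1, ih2, ih3, ih4, ih5⟩ := ihl off k hl hkl
      have hlen : k < (balive l).length := by rw [balive_length l hl]; exact hkl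
      simp only [bselRem, if_pos hkl]
      refine ⟨?_, ?_, ?_, ?_, ?_⟩
      · simp only [balive]
        rw [List.getD_append _ _ _ _ hlen, ih1]
      · simp only [balive, List.eraseIdx_append_of_lt_length hlen, ih2, ih4]
      · exact ⟨ih3, hr, by show sz = _ + _; rw [ih4]; exact hs, by show cnt - 1 = _ + _; rw [ih5]; omega⟩
      · simp [bsz]
      · simp [bcnt]
    · have hkr : k - bcnt l < bcnt r := by omega
      obtain ⟨ih1, ih2, ih3, ih4, ih5⟩ := ihr (off + bsz l) (k - bcnt l) hr hkr
      have hlen : (balive l).length ≤ k := by rw [balive_length l hl]; omega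
      have hlenr : k - bcnt l < (balive r).length := by rw [balive_length r hr]; exact hkr
      simp only [bselRem, if_neg hkl]
      have hmaplen : k - bcnt l < ((balive r).map (· + bsz l)).length := by
        simpa using hlenr
      refine ⟨?_, ?_, ?_, ?_, ?_⟩
      · rw [ih1]
        simp only [balive, List.getD_append_right _ _ _ _ hlen, balive_length l hl]
        rw [List.getD_eq_getElem _ _ hmaplen, List.getElem_map,
          List.getD_eq_getElem _ _ hlenr]
        omega
      · simp only [balive, List.eraseIdx_append_of_length_le hlen, balive_length l hl]
        rw [List.eraseIdx_map, ih2]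
      · exact ⟨hl, ih3, by show sz = _ + _; rw [ih4]; exact hs, by show cnt - 1 = _ + _; rw [ih5]; omega⟩
      · simp [bsz]
      · simp [bcnt]

lemma bbuild_spec (m : Nat) (hm : 1 ≤ m) :
    BWF (bbuild m) ∧ bsz (bbuild m) = m ∧ bcnt (bbuild m) = m
    ∧ balive (bbuild m) = List.range m := by
  induction m using Nat.strong_induction_on with
  | _ m ih =>
    by_cases h1 : m ≤ 1
    · have : m = 1 := by omega
      subst this
      simp [bbuild, BWF, bsz, bcnt, balive, List.range_succ]
    · have hh1 : 1 ≤ m / 2 := by omega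
      have hh2 : 1 ≤ m - m / 2 := by omega
      obtain ⟨w1, s1, c1, a1⟩ := ih (m / 2) (by omega) hh1
      obtain ⟨w2, s2, c2, a2⟩ := ih (m - m / 2) (by omega) hh2
      rw [bbuild, dif_neg h1]
      refine ⟨⟨w1, w2, by omega, by omega⟩, rfl, rfl, ?_⟩
      simp only [balive, a1, a2, s1]
      conv_rhs => rw [show m = m / 2 + (m - m / 2) by omega, List.range_add]
      congr 1
      apply List.map_congr_left
      intro x _
      omega

-- position p of the tree stands for the value p+1 of A's list
def pvPosVal (p : Nat) : Int := (p : Int) + 1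

-- the state correspondence between A's list and B's tree
def BInv (src : List Int) (t : BTree) (rem : Int) : Prop :=
  BWF t ∧ rem = (bcnt t : Int) ∧ src = (balive t).map pvPosVal

lemma pop?_none_of_ge {α : Type} (xs : List α) (i : Int) (h0 : 0 ≤ i)
    (h : (xs.length : Int) ≤ i) : PySem.List.pop? xs i = none := by
  simp only [PySem.List.pop?, PySem.List.pyIdx?, if_pos h0]
  rw [if_neg (by omega)]
  rfl

lemma forAB (is : List Int) (res : List Int) (t : BTree) (rem : Int) (d : Int)
    (hd : 0 < d) (hi : ∀ i ∈ is, 0 ≤ i) (hw : BWF t) (hr : rem = (bcnt t : Int)) :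
    (∃ res', IdSamplerForA ((balive t).map pvPosVal) res is d = Sum.inr res'
            ∧ IdSamplerForB t rem res is d = Sum.inr res')
    ∨ (∃ t' res', IdSamplerForA ((balive t).map pvPosVal) res is d
            = Sum.inl ((balive t').map pvPosVal, res')
        ∧ IdSamplerForB t rem res is d = Sum.inl (t', (bcnt t' : Int), res')
        ∧ BWF t') := by
  induction is generalizing res t rem with
  | nil =>
    right
    exact ⟨t, res, by rw [IdSamplerForA], by rw [IdSamplerForB, hr], hw⟩
  | cons i is ihis =>
    have hi0 : 0 ≤ i := hi i (by simp)
    have hbl : (balive t).length = bcnt t := balive_length t hw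
    have hlen : ((balive t).map pvPosVal).length = bcnt t := by
      rw [List.length_map, hbl]
    have hkk : PySem.Int.floordiv ((((balive t).map pvPosVal).length : Int) * i) d
        = PySem.Int.floordiv (rem * i) d := by rw [hlen, hr]
    set k : Int := PySem.Int.floordiv (rem * i) d with hkdef
    have hk0 : 0 ≤ k := by
      rw [hkdef, PySem.Int.floordiv_eq_ediv_of_pos hd]
      exact Int.ediv_nonneg (mul_nonneg (by rw [hr]; exact Int.natCast_nonneg _) hi0)
        (le_of_lt hd)
    by_cases hklt : k.toNat < bcnt t
    · -- in-range: both pop / select the k-th remaining element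
      have hksrc : k.toNat < ((balive t).map pvPosVal).length := by omega
      have hpop := PySem.List.pop?_natCast ((balive t).map pvPosVal) k.toNat hksrc
      rw [show ((k.toNat : Nat) : Int) = k by omega] at hpop
      obtain ⟨se1, se2, se3, se4, se5⟩ := bselRem_spec t 0 k.toNat hw hklt
      have hval : ((balive t).map pvPosVal)[k.toNat]'hksrc
          = pvPosVal (bselRem t 0 k.toNat).1 := by
        rw [List.getElem_map, se1, List.getD_eq_getElem _ _ (by omega : k.toNat < (balive t).length)]
        simp
      have hsrc' : ((balive t).map pvPosVal).eraseIdx k.toNat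
          = (balive (bselRem t 0 k.toNat).2).map pvPosVal := by
        rw [se2, List.eraseIdx_map]
      have hcnt1 : 1 ≤ bcnt t := by omega
      have hterm : (((balive t).map pvPosVal).eraseIdx k.toNat).length = 0 ↔ rem - 1 = 0 := by
        rw [List.length_eraseIdx_of_lt hksrc, hlen, hr]
        omega
      rw [IdSamplerForA, IdSamplerForB]
      simp only [← hkdef, hkk, hpop, if_pos (And.intro hk0 hklt)]
      by_cases hz : rem - 1 = 0
      · left
        refine ⟨res ++ [pvPosVal (bselRem t 0 k.toNat).1], ?_, ?_⟩
        · rw [hval, if_pos (hterm.mpr hz)]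
        · rw [if_pos hz]
          rfl
      · have hz' : ¬ (((balive t).map pvPosVal).eraseIdx k.toNat).length = 0 :=
          fun h => hz (hterm.mp h)
        rw [hval, if_neg hz', if_neg hz, hsrc']
        exact ihis (res ++ [pvPosVal (bselRem t 0 k.toNat).1])
          (bselRem t 0 k.toNat).2 (rem - 1) (fun j hj => hi j (by simp [hj]))
          se3 (by rw [hr, se5]; omega)
    · -- out of range: A's pop raises (→ .inr res), B's guard fails (→ .inr res)
      have hnone : PySem.List.pop? ((balive t).map pvPosVal) k = none :=
        pop?_none_of_ge _ _ hk0 (by omega)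
      left
      refine ⟨res, ?_, ?_⟩
      · rw [IdSamplerForA]
        simp only [hkk, hnone]
      · rw [IdSamplerForB]
        rw [show PySem.Int.floordiv (rem * i) d = k from hkdef.symm, if_neg (by omega)]

lemma loopAB (fuel : Nat) (src res : List Int) (t : BTree) (rem : Int) (d : Int)
    (hd : 0 < d) (hinv : BInv src t rem) :
    IdSamplerLoopA fuel src res d = IdSamplerLoopB fuel t rem res d := by
  obtain ⟨hw, hr, hs⟩ := hinv
  subst hs
  induction fuel generalizing res t rem d with
  | zero => rfl
  | succ fuel ih =>
    have hi : ∀ i ∈ PySem.List.pyRange 1 d 2, 0 ≤ i := by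
      intro i hmem
      have := (PySem.List.mem_pyRange_iff_of_pos (by norm_num) i).mp hmem
      omega
    rcases forAB (PySem.List.pyRange 1 d 2) res t rem d hd hi hw hr with
      ⟨res', h1, h2⟩ | ⟨t', res', h1, h2, hw'⟩
    · rw [IdSamplerLoopA, IdSamplerLoopB, h1, h2]
    · rw [IdSamplerLoopA, IdSamplerLoopB, h1, h2]
      exact ih _ _ _ _ (by positivity) hw' rfl

-- ===== VERDICT (by name: the statement is the Claim_ definition above) =====
theorem IdSampler_spec : Claim_equal_IdSampler := by
  intro N _ hpre
  unfold Spec_IdSampler IdSampler IdSampler_alt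
  by_cases h0 : N = 0
  · simp [h0]
  by_cases h1 : N = 1
  · simp [h1]
  by_cases h2 : N = 2
  · simp [h2]
  have h3 : 3 ≤ N := by
    have : 0 ≤ N := hpre
    omega
  rw [if_neg h0, if_neg h1, if_neg h2, if_neg h0, if_neg h1, if_neg h2]
  -- peel the two initial pops from range(N)
  have e1 : PySem.List.pyRange 0 N 1 = 0 :: PySem.List.pyRange 1 N 1 := by
    have := PySem.List.pyRange_one_cons (a := 0) (b := N) (by omega)
    simpa using this
  have e2 : PySem.List.pyRange 1 N 1 = PySem.List.pyRange 1 (N - 1) 1 ++ [N - 1] := by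
    have := PySem.List.pyRange_one_succ_right (a := 1) (b := N - 1) (by omega)
    rw [show N - 1 + 1 = N by omega] at this
    simpa using this
  simp only [e1, e2, PySem.List.pop?_zero_cons, PySem.List.pop?_last]
  -- initial state correspondence
  show _ = IdSamplerLoopB N.toNat (bbuild (N - 2).toNat) (((N - 2).toNat : Nat) : Int) [0, N - 1] 2
  have hM1 : 1 ≤ (N - 2).toNat := by omega
  obtain ⟨bw, bs, bc, ba⟩ := bbuild_spec (N - 2).toNat hM1
  apply loopAB _ _ _ _ _ _ (by norm_num)
  refine ⟨bw, by rw [bc], ?_⟩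
  rw [ba, PySem.List.pyRange_one]
  have h12 : (N - 1 - 1).toNat = (N - 2).toNat := by omega
  rw [h12]
  apply List.map_congr_left
  intro k _
  simp [pvPosVal]
  omega
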